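-- pv_equiv track=rewrite | github.com/daniel-reich/ubiquitous-fiesta | YRwZvg5Pkgw4pEWC5_23.py | flick_switch
-- ===== SOURCE A (Python) =====
-- def flick_switch(lst):
--   new = []
--   toggle = True
--   for i in lst:
--     if i=='flick':
--       toggle = not toggle
--     new.append(toggle)
--   return new
-- ===== SOURCE B (Python) =====
-- def flick_switch(lst):
--     # two-stage: cumulative flick counts, then map each prefix count to its parity
--     counts = []
--     c = 0
--     for i in lst:
--         if i == 'flick':
--             c += 1
--         counts.append(c)
--     return [c % 2 == 0 for c in counts]
-- ===== Notes on version B (the rewrite author's own statement) =====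
-- stated objective: alternative
-- what changed: Replaces the inline boolean toggle with a two-stage pipeline: first build the running count of 'flick' occurrences per position, then map each prefix count to its parity (even count = True).
import Mathlib
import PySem

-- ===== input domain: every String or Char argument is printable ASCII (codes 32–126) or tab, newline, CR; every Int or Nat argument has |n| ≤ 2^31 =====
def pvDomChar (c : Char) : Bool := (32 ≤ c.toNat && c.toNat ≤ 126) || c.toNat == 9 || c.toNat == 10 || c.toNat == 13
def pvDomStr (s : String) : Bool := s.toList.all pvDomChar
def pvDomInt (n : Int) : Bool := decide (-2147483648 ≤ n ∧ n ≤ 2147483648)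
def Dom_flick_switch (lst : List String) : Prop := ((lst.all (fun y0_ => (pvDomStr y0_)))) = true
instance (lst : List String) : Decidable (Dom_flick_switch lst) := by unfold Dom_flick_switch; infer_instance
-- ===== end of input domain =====

-- B replaces A's inline boolean toggle with a two-stage pipeline (running flick counts, then parity map); objective: alternative decomposition, same O(n) cost.


-- ===== PORT A =====
-- A's loop: append the current toggle state per element
def flickLoopA : List String → List Bool → Bool → List Bool
  | [], new, _ => new
  | i :: rest, new, toggle =>
    let t := if i == "flick" then !toggle else toggle
    flickLoopA rest (new ++ [t]) t

def flick_switch (lst : List String) : List Bool := flickLoopA lst [] true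

-- ===== PORT B =====
-- B stage 1: running count of 'flick' occurrences
def flickCounts : List String → List Int → Int → List Int
  | [], cs, _ => cs
  | i :: rest, cs, c =>
    let c' := if i == "flick" then c + 1 else c
    flickCounts rest (cs ++ [c']) c'

-- B stage 2: map each prefix count to its parity
def flick_switch_alt (lst : List String) : List Bool :=
  (flickCounts lst [] 0).map (fun c => decide (c % 2 = 0))

-- ===== PRECONDITION & SPEC =====
def Spec_flick_switch (lst : List String) (out : List Bool) : Prop := out = flick_switch_alt lst
instance (lst : List String) (out : List Bool) : Decidable (Spec_flick_switch lst out) := by unfold Spec_flick_switch; infer_instance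

-- ===== CLAIM (what is proved, stated in full; the proofs are below) =====
def Claim_equal_flick_switch : Prop := ∀ (lst : List String), Dom_flick_switch lst → Spec_flick_switch lst (flick_switch lst)

-- ===== LEMMAS AND PROOFS =====

-- ===== VERDICT (by name: the statement is the Claim_ definition above) =====
lemma flick_loop_eq (lst : List String) : ∀ (new : List Bool) (cs : List Int) (c : Int),
    new = cs.map (fun c => decide (c % 2 = 0)) →
    flickLoopA lst new (decide (c % 2 = 0)) = (flickCounts lst cs c).map (fun c => decide (c % 2 = 0)) := by
  induction lst with
  | nil => intro new cs c h; simpa [flickLoopA, flickCounts] using h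
  | cons i rest ih =>
    intro new cs c h
    simp only [flickLoopA, flickCounts]
    by_cases hi : i == "flick"
    · have hpar : (!decide (c % 2 = 0)) = decide ((c + 1) % 2 = 0) := by
        rcases Int.emod_two_eq_zero_or_one c with h2 | h2 <;> simp [h2] <;> omega
      simp only [hi, hpar]
      exact ih _ _ (c + 1) (by simp [h])
    · simp only [hi, if_neg, Bool.false_eq_true, not_false_iff]
      exact ih _ _ c (by simp [h])

theorem flick_switch_spec : Claim_equal_flick_switch := by
  intro lst _
  unfold Spec_flick_switch flick_switch flick_switch_alt
  have := flick_loop_eq lst [] [] 0 rfl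
  simpa using this
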